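-- pv_equiv track=rewrite | github.com/cohbev/python-email-address-validator | EmailValidator_CohenBeveridge.py | FindTLD
-- ===== SOURCE A (Python) =====
-- def UnBackslashed(string, character):
--     backslashes = 0
--     if string[character - 1] != '\\':  # Returns True straight away if the character before isn't a backslash
--         return True
--     for x in range(character):
--         if string[character - x - 1] == '\\':   # Checks every character counting backwards
--             backslashes += 1
--         else:
--             break   # If it's not a backslash the loop ends
--     return backslashes % 2 == 0  # Backslash amount must be even to be plain/literal
--
-- def OpenQuoteAndBracket(address):
--     openquote = -1
--     openbracket = -1
--     for char in range(len(address)):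
--         if UnBackslashed(address, char):  # A backslashed quote/bracket does not count
--             if address[char] == '"' and openquote == -1:
--                 openquote = char
--             if address[char] == '(' and openbracket == -1:
--                 openbracket = char
--     return openquote, openbracket
--
-- def CloseBracket(address, openbracket):
--     check = address[openbracket + 1:]       # The string to check
--     incomments = 1
--     closebracket = -1
--     for char in range(len(check)):
--         if incomments == 0:     # If the comment has closed, break the loop
--             break
--         if UnBackslashed(check, char):
--             if check[char] == '(':      # The imbalance of comments within comments increases
--                 incomments += 1
--             elif check[char] == ')':    # The imbalance of comments within comments decreases
--                 incomments -= 1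
--                 closebracket = char
--     if closebracket == -1 or incomments != 0:   # Check if parentheses did not match
--         return 'invalid'
--     else:
--         return closebracket + openbracket + 1   # Accounts for the variable 'check' being shorter than the address
--
-- def ReplacePart(address, start, end, sort):     # 'sort' is either "q" or "c"
--     before = address[:start]
--     after = address[end + 1:]
--     part = address[start:end + 1]
--     length = len(part)
--     fillin = sort * length      # E.g. (aa) -> cccc  ||  "aa" -> qqqq
--     address = before + fillin + after
--     return address
--
-- def CloseQuote(address, openquote):
--     check = address[openquote + 1:]     # A variable with part the of address to check
--     closequote = -1
--     for char in range(len(check)):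
--         if UnBackslashed(check, char):
--             if check[char] == '"':
--                 closequote = char
--                 break
--     if closequote == -1:
--         return 'invalid'
--     else:
--         return closequote + openquote + 1
--
-- def ReplaceQuotesComments(address):
--     while True:
--         openquote, openbracket = OpenQuoteAndBracket(address)  # Assign the opening quote and the opening bracket
--
--         if openquote == -1 and openbracket != -1:  # Comments were found, but not quotes
--             closebracket = CloseBracket(address, openbracket)
--             address = ReplacePart(address, openbracket, closebracket, 'c')  # Replaces the comment and moves on
--
--         elif openquote == -1 and openbracket == -1:  # Neither quote not comment exists
--             return address  # Ends the function
--
--         elif openbracket == -1 and openquote != -1:  # Quotes were found, but not comments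
--             closequote = CloseQuote(address, openquote)
--             address = ReplacePart(address, openquote, closequote, 'q')  # Replaces the quote and move on
--
--         else:  # Both quotes and comments were found
--             if openquote < openbracket:  # The quote is first
--                 closequote = CloseQuote(address, openquote)
--                 address = ReplacePart(address, openquote, closequote, 'q')  # Replaces the quote
--             else:   # The comment is first
--                 closebracket = CloseBracket(address, openbracket)
--                 address = ReplacePart(address, openbracket, closebracket, 'c')  # Replaces the comment
--
-- def FindAt(address):
--     address = ReplaceQuotesComments(address)
--     at_pos = address.find('@')
--     return at_pos
--
-- def FindTLD(address):
--     at_pos = FindAt(address)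
--     lastdot = at_pos  # Initialises lastdot variable
--     for char in range(len(address)):
--         if address[char] == '.':
--             lastdot = char  # Finds the last dot
--     tld = address[lastdot + 1:]  # Sets the Top Level Domain to be everything after the last dot
--     return tld  # Returns the Top Level Domain
-- ===== SOURCE B (Python) =====
-- def _at_pos_masked(address):
--     # One left-to-right pass: track quote/comment nesting state and backslash-run parity;
--     # return the index of the first '@' outside all quotes/comments, or -1.
--     mode = 0          # 0 = outside, 1 = inside quotes, 2 = inside comment
--     depth = 0         # comment nesting depth (meaningful when mode == 2)
--     even = True       # the run of backslashes immediately before the current char has even length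
--     for i, ch in enumerate(address):
--         unb = even
--         even = (not even) if ch == '\\' else True
--         if mode == 0:
--             if unb and ch == '"':
--                 mode = 1
--             elif unb and ch == '(':
--                 mode = 2
--                 depth = 1
--             elif ch == '@':
--                 return i
--         elif mode == 1:
--             if unb and ch == '"':
--                 mode = 0
--         else:
--             if unb and ch == '(':
--                 depth += 1
--             elif unb and ch == ')':
--                 depth -= 1
--                 if depth == 0:
--                     mode = 0
--     return -1
--
-- def FindTLD(address):
--     dot = -1
--     for i, ch in enumerate(address):
--         if ch == '.':
--             dot = i
--     if dot == -1:
--         # no dot anywhere: the TLD starts right after the '@' found in the masked address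
--         dot = _at_pos_masked(address)
--     return address[dot + 1:]
-- ===== Notes on version B (the rewrite author's own statement) =====
-- stated objective: alternative
-- what changed: Replaces A's repeated find-opener/find-closer/rewrite masking rounds (each round rescans the whole string and re-derives backslash runs with an inner loop) by a single left-to-right state machine over the original string that tracks quote/comment nesting depth and incremental backslash parity, and skips masking entirely when the address contains a dot.
import Mathlib
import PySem

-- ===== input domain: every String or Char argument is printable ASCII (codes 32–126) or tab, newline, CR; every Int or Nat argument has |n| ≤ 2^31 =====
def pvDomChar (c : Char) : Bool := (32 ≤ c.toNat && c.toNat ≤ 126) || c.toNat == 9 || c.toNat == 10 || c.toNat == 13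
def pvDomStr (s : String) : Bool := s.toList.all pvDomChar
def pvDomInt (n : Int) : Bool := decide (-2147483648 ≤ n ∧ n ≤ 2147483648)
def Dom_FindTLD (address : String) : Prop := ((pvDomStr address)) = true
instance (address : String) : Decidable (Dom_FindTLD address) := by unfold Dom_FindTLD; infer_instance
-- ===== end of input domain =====

-- B replaces A's repeated rescan-and-rewrite masking rounds by one left-to-right pass tracking
-- quote/comment state and backslash parity; equality of the returned suffix is proved on all
-- inputs where A returns (Pre_FindTLD).

-- ===== PORT A =====
-- UnBackslashed's inner for-loop: number of consecutive backslashes immediately before index c.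
def pvBsRun (s : List Char) : Nat → Nat
  | 0 => 0
  | k + 1 => if s.getD k ' ' == '\\' then pvBsRun s k + 1 else 0

-- UnBackslashed(string, character).  string[character-1] is a Python (possibly negative) index.
-- (A only calls it with 0 ≤ character < len(string); the `none` arm is unreachable there.)
def pvUnb (s : List Char) (c : Nat) : Bool :=
  match PySem.List.pyGet? s ((c : Int) - 1) with
  | none => true
  | some ch => if ch != '\\' then true else pvBsRun s c % 2 == 0

-- OpenQuoteAndBracket(address)
def pvOQB (s : List Char) : Int × Int :=
  (List.range s.length).foldl
    (fun st ch =>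
      if pvUnb s ch then
        ((if s.getD ch ' ' == '"' && st.1 == -1 then (ch : Int) else st.1),
         (if s.getD ch ' ' == '(' && st.2 == -1 then (ch : Int) else st.2))
      else st)
    (-1, -1)

-- the for-loop of CloseBracket; `rem` is check.drop i (the part still to visit)
def pvCBLoop (check : List Char) : List Char → Nat → Int → Int → Int × Int
  | [], _, inc, cb => (inc, cb)
  | _ :: rem, i, inc, cb =>
    if inc == 0 then (inc, cb)
    else if pvUnb check i then
      if check.getD i ' ' == '(' then pvCBLoop check rem (i + 1) (inc + 1) cb
      else if check.getD i ' ' == ')' then pvCBLoop check rem (i + 1) (inc - 1) (i : Int)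
      else pvCBLoop check rem (i + 1) inc cb
    else pvCBLoop check rem (i + 1) inc cb

-- CloseBracket(address, openbracket); `none` is Python's string 'invalid'
def pvCloseBracket (s : List Char) (ob : Int) : Option Int :=
  let check := PySem.List.slice s (some (ob + 1)) none
  let r := pvCBLoop check check 0 1 (-1)
  if r.2 == -1 || r.1 != 0 then none else some (r.2 + ob + 1)

-- ReplacePart(address, start, end, sort)
def pvReplacePart (s : List Char) (start fin : Int) (sort : Char) : List Char :=
  let before := PySem.List.slice s none (some start)
  let after := PySem.List.slice s (some (fin + 1)) none
  let part := PySem.List.slice s (some start) (some (fin + 1))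
  before ++ List.replicate part.length sort ++ after

-- the for-loop of CloseQuote (break at the first unbackslashed quote)
def pvCQLoop (check : List Char) : List Char → Nat → Int
  | [], _ => -1
  | _ :: rem, i =>
    if pvUnb check i && check.getD i ' ' == '"' then (i : Int)
    else pvCQLoop check rem (i + 1)

-- CloseQuote(address, openquote); `none` is Python's string 'invalid'
def pvCloseQuote (s : List Char) (oq : Int) : Option Int :=
  let check := PySem.List.slice s (some (oq + 1)) none
  let cq := pvCQLoop check check 0
  if cq == -1 then none else some (cq + oq + 1)

-- ReplaceQuotesComments(address): Python's `while True`.  Each pass that replaces removes at least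
-- one '"'/'(' character, so fuel (length + 1) is never exhausted; where Python raises a TypeError
-- (CloseQuote/CloseBracket returned 'invalid') the port returns the current string — those inputs
-- are excluded by Pre_FindTLD.
def pvRQC : Nat → List Char → List Char
  | 0, s => s
  | fuel + 1, s =>
    let p := pvOQB s
    if p.1 == -1 && p.2 != -1 then
      match pvCloseBracket s p.2 with
      | none => s
      | some cb => pvRQC fuel (pvReplacePart s p.2 cb 'c')
    else if p.1 == -1 && p.2 == -1 then s
    else if p.2 == -1 && p.1 != -1 then
      match pvCloseQuote s p.1 with
      | none => s
      | some cq => pvRQC fuel (pvReplacePart s p.1 cq 'q')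
    else
      if p.1 < p.2 then
        match pvCloseQuote s p.1 with
        | none => s
        | some cq => pvRQC fuel (pvReplacePart s p.1 cq 'q')
      else
        match pvCloseBracket s p.2 with
        | none => s
        | some cb => pvRQC fuel (pvReplacePart s p.2 cb 'c')

-- FindAt(address)
def pvFindAt (s : List Char) : Int :=
  let masked := pvRQC (s.length + 1) s
  PySem.Chars.find masked ['@']

-- FindTLD(address)
def FindTLD (address : String) : String :=
  let s := address.toList
  let atPos := pvFindAt s
  let lastdot := (List.range s.length).foldl
    (fun ld ch => if s.getD ch ' ' == '.' then (ch : Int) else ld) atPos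
  String.ofList (PySem.List.slice s (some (lastdot + 1)) none)

-- ===== PORT B =====
inductive PvMode
  | mout | mq | mc (d : Nat)
deriving DecidableEq, Repr

-- _at_pos_masked(address): mode/depth/backslash-parity state machine, first '@' outside
-- quotes/comments; iterates over the remaining characters, i is the current absolute index.
def pvAt : List Char → Nat → Bool → PvMode → Int
  | [], _, _, _ => -1
  | ch :: rem, i, ev, m =>
    let unb := ev
    let ev' := if ch == '\\' then !ev else true
    match m with
    | .mout =>
      if unb && ch == '"' then pvAt rem (i + 1) ev' .mq
      else if unb && ch == '(' then pvAt rem (i + 1) ev' (.mc 1)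
      else if ch == '@' then (i : Int)
      else pvAt rem (i + 1) ev' .mout
    | .mq =>
      if unb && ch == '"' then pvAt rem (i + 1) ev' .mout else pvAt rem (i + 1) ev' .mq
    | .mc d =>
      if unb && ch == '(' then pvAt rem (i + 1) ev' (.mc (d + 1))
      else if unb && ch == ')' then
        (if d == 1 then pvAt rem (i + 1) ev' .mout else pvAt rem (i + 1) ev' (.mc (d - 1)))
      else pvAt rem (i + 1) ev' (.mc d)

-- B's last-dot loop
def pvDotLoop : List Char → Nat → Int → Int
  | [], _, d => d
  | ch :: rem, i, d => pvDotLoop rem (i + 1) (if ch == '.' then (i : Int) else d)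

def FindTLD_alt (address : String) : String :=
  let s := address.toList
  let dot0 := pvDotLoop s 0 (-1)
  let dot := if dot0 == -1 then pvAt s 0 true .mout else dot0
  String.ofList (PySem.List.slice s (some (dot + 1)) none)

-- ===== PRECONDITION & SPEC =====
-- Specification scanner (used by Pre_ and by the proofs; neither port uses it): one pass that
-- returns the masked string together with the final quote/comment state.
def pvScan : List Char → Bool → PvMode → List Char × PvMode
  | [], _, m => ([], m)
  | ch :: rem, ev, m =>
    let unb := ev
    let ev' := if ch == '\\' then !ev else true
    match m with
    | .mout =>
      if unb && ch == '"' then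
        let r := pvScan rem ev' .mq; ('q' :: r.1, r.2)
      else if unb && ch == '(' then
        let r := pvScan rem ev' (.mc 1); ('c' :: r.1, r.2)
      else
        let r := pvScan rem ev' .mout; (ch :: r.1, r.2)
    | .mq =>
      if unb && ch == '"' then
        let r := pvScan rem ev' .mout; ('q' :: r.1, r.2)
      else
        let r := pvScan rem ev' .mq; ('q' :: r.1, r.2)
    | .mc d =>
      if unb && ch == '(' then
        let r := pvScan rem ev' (.mc (d + 1)); ('c' :: r.1, r.2)
      else if unb && ch == ')' then
        (if d == 1 then
          let r := pvScan rem ev' .mout; ('c' :: r.1, r.2)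
        else
          let r := pvScan rem ev' (.mc (d - 1)); ('c' :: r.1, r.2))
      else
        let r := pvScan rem ev' (.mc d); ('c' :: r.1, r.2)

-- Pre_ excludes exactly the inputs with an unclosed unbackslashed quote or unbalanced comment
-- parentheses: there Python's A raises a TypeError ('invalid' flows into ReplacePart's slicing).
def Pre_FindTLD (address : String) : Prop :=
  (pvScan address.toList true PvMode.mout).2 = PvMode.mout
instance (address : String) : Decidable (Pre_FindTLD address) := by
  unfold Pre_FindTLD; infer_instance

def pvWitness_FindTLD : String := "John.Smith(comment)@\"exa.mple\".com"

def Spec_FindTLD (address : String) (out : String) : Prop := out = FindTLD_alt address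
instance (address : String) (out : String) : Decidable (Spec_FindTLD address out) := by
  unfold Spec_FindTLD; infer_instance

-- ===== CLAIM (what is proved, stated in full; the proofs are below) =====
def Claim_equal_FindTLD : Prop :=
  ∀ (address : String), Dom_FindTLD address → Pre_FindTLD address →
    Spec_FindTLD address (FindTLD address)

-- ===== LEMMAS AND PROOFS =====

def pvEv (s : List Char) (i : Nat) : Bool := pvBsRun s i % 2 == 0
theorem pvEv_succ (s : List Char) (i : Nat) :
    pvEv s (i + 1) = if s.getD i ' ' == '\\' then !(pvEv s i) else true := by
  show (pvBsRun s (i+1) % 2 == 0) = _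
  rw [pvBsRun]
  rcases Nat.mod_two_eq_zero_or_one (pvBsRun s i) with h | h <;>
    split <;> simp [pvEv, Nat.add_mod, h]

theorem pvUnb_eq (s : List Char) (i : Nat) (h : i < s.length) : pvUnb s i = pvEv s i := by
  cases i with
  | zero =>
    have hne : s ≠ [] := by intro hs; simp [hs] at h
    unfold pvUnb
    have : ((0 : Nat) : Int) - 1 = -1 := by norm_num
    rw [this, PySem.List.pyGet?_neg_one]
    obtain ⟨x, hx⟩ := List.getLast?_isSome.mpr hne |> Option.isSome_iff_exists.mp
    rw [hx]
    simp only [pvEv, pvBsRun]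
    split <;> simp
  | succ j =>
    unfold pvUnb
    have h1 : ((j + 1 : Nat) : Int) - 1 = ((j : Nat) : Int) := by push_cast; ring
    rw [h1, PySem.List.pyGet?_natCast, List.getElem?_eq_getElem (by omega)]
    simp only
    have hg : s.getD j ' ' = s[j] := by
      rw [List.getD_eq_getElem?_getD, List.getElem?_eq_getElem (by omega)]; rfl
    rw [pvEv_succ, hg]
    by_cases hc : s[j] = '\\'
    · have hb : (s[j] == '\\') = true := by simp [hc]
      have hb2 : (s[j] != '\\') = false := by simp [hc]
      rw [hb, hb2]
      simp only [if_neg (by simp : ¬ (false = true)), if_pos rfl]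
      simp only [pvEv, pvBsRun, hg, hb, if_pos rfl]
      rcases Nat.mod_two_eq_zero_or_one (pvBsRun s j) with h2 | h2 <;>
        simp [Nat.add_mod, h2]
    · have hb : (s[j] == '\\') = false := by simp [hc]
      have hb2 : (s[j] != '\\') = true := by simp [hc]
      rw [hb, hb2]
      simp

theorem pvBsRun_drop (s : List Char) (m : Nat)
    (hm : m = 0 ∨ s.getD (m - 1) ' ' ≠ '\\') : ∀ (k : Nat),
    pvBsRun (s.drop m) k = pvBsRun s (m + k) := by
  intro k
  induction k with
  | zero =>
    rcases hm with h | h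
    · simp [h, pvBsRun]
    · cases m with
      | zero => rfl
      | succ m' =>
        show pvBsRun (s.drop (m'+1)) 0 = pvBsRun s (m' + 1)
        rw [pvBsRun, pvBsRun]
        have : (s.getD m' ' ' == '\\') = false := by
          simpa using h
        rw [this]; rfl
  | succ k ih =>
    show pvBsRun (s.drop m) (k+1) = pvBsRun s (m + k + 1)
    rw [pvBsRun, pvBsRun]
    have hg : (s.drop m).getD k ' ' = s.getD (m + k) ' ' := by
      rw [List.getD_eq_getElem?_getD, List.getD_eq_getElem?_getD, List.getElem?_drop]
    rw [hg, ih]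

theorem pvTwoCount (s : List Char) : s.count '"' + s.count '(' ≤ s.length := by
  induction s with
  | nil => simp
  | cons x xs ih =>
    simp only [List.count_cons, List.length_cons]
    by_cases h1 : x = '"' <;> by_cases h2 : x = '(' <;> simp_all <;> omega

def pvFirst (s : List Char) (p : Nat → Bool) (i : Nat) : Option Nat :=
  if _h : i < s.length then (if p i then some i else pvFirst s p (i + 1)) else none
termination_by s.length - i

theorem pvFirst_ge (s : List Char) (p : Nat → Bool) (i : Nat) (h : s.length ≤ i) :
    pvFirst s p i = none := by
  unfold pvFirst; rw [dif_neg (by omega)]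

theorem pvFirst_some (s : List Char) (p : Nat → Bool) :
    ∀ i j, pvFirst s p i = some j →
      i ≤ j ∧ j < s.length ∧ p j = true ∧ ∀ k, i ≤ k → k < j → p k = false := by
  have H : ∀ n i j, s.length - i ≤ n → pvFirst s p i = some j →
      i ≤ j ∧ j < s.length ∧ p j = true ∧ ∀ k, i ≤ k → k < j → p k = false := by
    intro n
    induction n with
    | zero =>
      intro i j hn hf
      rw [pvFirst_ge s p i (by omega)] at hf; exact absurd hf (by simp)
    | succ n ih =>
      intro i j hn hf
      by_cases hi : i < s.length
      · rw [pvFirst] at hf; rw [dif_pos hi] at hf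
        by_cases hp : p i = true
        · rw [if_pos hp] at hf
          obtain rfl : i = j := by injection hf
          exact ⟨le_refl _, hi, hp, fun k hk1 hk2 => absurd (lt_of_lt_of_le hk2 hk1) (lt_irrefl _)⟩
        · rw [if_neg hp] at hf
          obtain ⟨h1, h2, h3, h4⟩ := ih (i+1) j (by omega) hf
          refine ⟨by omega, h2, h3, fun k hk1 hk2 => ?_⟩
          rcases Nat.eq_or_lt_of_le hk1 with rfl | hlt
          · exact Bool.eq_false_iff.mpr hp
          · exact h4 k (by omega) hk2
      · rw [pvFirst_ge s p i (by omega)] at hf; exact absurd hf (by simp)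
  exact fun i j => H (s.length - i) i j (le_refl _)

theorem pvFirst_none (s : List Char) (p : Nat → Bool) :
    ∀ i, pvFirst s p i = none → ∀ j, i ≤ j → j < s.length → p j = false := by
  have H : ∀ n i, s.length - i ≤ n → pvFirst s p i = none →
      ∀ j, i ≤ j → j < s.length → p j = false := by
    intro n
    induction n with
    | zero => intro i hn _ j hj1 hj2; omega
    | succ n ih =>
      intro i hn hf j hj1 hj2
      have hi : i < s.length := by omega
      rw [pvFirst, dif_pos hi] at hf
      by_cases hp : p i = true
      · rw [if_pos hp] at hf; exact absurd hf (by simp)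
      · rw [if_neg hp] at hf
        rcases Nat.eq_or_lt_of_le hj1 with rfl | hlt
        · exact Bool.eq_false_iff.mpr hp
        · exact ih (i+1) (by omega) hf j (by omega) hj2
  exact fun i => H (s.length - i) i (le_refl _)

def pvFC (l : List Char) (c : Char) : Int :=
  match l with
  | [] => -1
  | x :: xs => if x == c then 0 else if pvFC xs c == -1 then -1 else pvFC xs c + 1

theorem pvFC_eq_neg_one_iff (c : Char) : ∀ l : List Char, pvFC l c = -1 ↔ c ∉ l := by
  intro l
  induction l with
  | nil => simp [pvFC]
  | cons x xs ih =>
    rw [pvFC]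
    by_cases hx : x = c
    · simp [hx]
    · have : (x == c) = false := by simp [hx]
      rw [this, if_neg (by simp)]
      by_cases h2 : pvFC xs c = -1
      · simp only [h2]
        constructor
        · intro _ hmm
          rcases List.mem_cons.mp hmm with h | h
          · exact hx h.symm
          · exact (ih.mp h2) h
        · intro _; rfl
      · have hb : (pvFC xs c == -1) = false := by simp [h2]
        rw [hb, if_neg (by simp)]
        constructor
        · intro he
          have : -1 ≤ pvFC xs c := by
            clear ih h2 hb he
            induction xs with
            | nil => simp [pvFC]
            | cons y ys ihy => rw [pvFC]; split; omega; split; omega; omega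
          omega
        · intro hm
          exfalso; exact h2 (ih.mpr (by simp [hx] at hm; simpa using hm.2))

theorem pvFC_spec (c : Char) : ∀ l : List Char, c ∈ l →
    0 ≤ pvFC l c ∧ (pvFC l c).toNat < l.length ∧ l[(pvFC l c).toNat]? = some c ∧
      ∀ i, i < (pvFC l c).toNat → l[i]? ≠ some c := by
  intro l
  induction l with
  | nil => simp
  | cons x xs ih =>
    intro hm
    rw [pvFC]
    by_cases hx : x = c
    · simp [hx]
    · have hxc : (x == c) = false := by simp [hx]
      rw [hxc, if_neg (by simp)]
      have hmem : c ∈ xs := by rcases List.mem_cons.mp hm with h | h; exact absurd h.symm hx; exact h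
      have hne : ¬ pvFC xs c = -1 := fun he => (pvFC_eq_neg_one_iff c xs).mp he hmem
      have hb : (pvFC xs c == -1) = false := by simp [hne]
      rw [hb, if_neg (by simp)]
      obtain ⟨h0, hlt, hget, hmin⟩ := ih hmem
      have ht : (pvFC xs c + 1).toNat = (pvFC xs c).toNat + 1 := by omega
      refine ⟨by omega, by simp [ht]; omega, ?_, ?_⟩
      · rw [ht]; simpa using hget
      · intro i hi
        rw [ht] at hi
        cases i with
        | zero => simpa using hx
        | succ i' => simpa using hmin i' (by omega)

theorem pvFind_single (m : List Char) (c : Char) : PySem.Chars.find m [c] = pvFC m c := by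
  have hpre : ∀ (t : List Char), [c] <+: t ↔ t.head? = some c := by
    intro t; cases t with
    | nil => simp
    | cons y ys => rw [List.cons_prefix_cons]; simp [eq_comm]
  by_cases hm : c ∈ m
  · have hinf : [c] <:+: m := (List.singleton_infix_iff c m).mpr hm
    have hne : PySem.Chars.find m [c] ≠ -1 := by
      rw [Ne, PySem.Chars.find_eq_neg_one_iff]; simpa using hinf
    have hge : 0 ≤ PySem.Chars.find m [c] := by
      have := PySem.Chars.neg_one_le_find (s := m) (sub := [c]); omega
    obtain ⟨hp, hmin⟩ := PySem.Chars.find_spec hge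
    have hgetf : m[(PySem.Chars.find m [c]).toNat]? = some c := by
      have := (hpre _).mp hp
      rwa [List.head?_drop] at this
    obtain ⟨h0, hlt, hget, hmin2⟩ := pvFC_spec c m hm
    have hle1 : (pvFC m c).toNat ≤ (PySem.Chars.find m [c]).toNat := by
      by_contra hcon
      exact hmin2 _ (by omega) hgetf
    have hle2 : (PySem.Chars.find m [c]).toNat ≤ (pvFC m c).toNat := by
      by_contra hcon
      exact hmin (pvFC m c).toNat (by omega) ((hpre _).mpr (by rwa [List.head?_drop]))
    have e1 := Int.toNat_of_nonneg hge
    have e2 := Int.toNat_of_nonneg h0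
    omega
  · rw [(pvFC_eq_neg_one_iff c m).mpr hm]
    rw [PySem.Chars.find_eq_neg_one_iff]
    rw [List.singleton_infix_iff]
    exact hm

def pvLastFrom (s : List Char) (i : Nat) : Option Nat :=
  if _h : i < s.length then
    (match pvLastFrom s (i + 1) with
     | some j => some j
     | none => if s.getD i ' ' == '.' then some i else none)
  else none
termination_by s.length - i

theorem pvDot_A (s : List Char) : ∀ (i : Nat) (x : Int),
    (List.range' i (s.length - i)).foldl
      (fun ld ch => if s.getD ch ' ' == '.' then (ch : Int) else ld) x =
    (match pvLastFrom s i with | some j => (j : Int) | none => x) := by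
  have H : ∀ n i x, s.length - i ≤ n →
      (List.range' i (s.length - i)).foldl
        (fun ld ch => if s.getD ch ' ' == '.' then (ch : Int) else ld) x =
      (match pvLastFrom s i with | some j => (j : Int) | none => x) := by
    intro n
    induction n with
    | zero =>
      intro i x hn
      have h0 : s.length - i = 0 := by omega
      rw [h0, pvLastFrom, dif_neg (by omega)]
      simp
    | succ n ih =>
      intro i x hn
      by_cases hi : i < s.length
      · have hr : s.length - i = (s.length - (i + 1)) + 1 := by omega
        rw [hr, List.range'_succ, List.foldl_cons, ih (i+1) _ (by omega)]
        conv_rhs => rw [pvLastFrom, dif_pos hi]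
        cases hlf : pvLastFrom s (i+1) with
        | some j => simp
        | none => simp only; split <;> simp
      · have h0 : s.length - i = 0 := by omega
        rw [h0, pvLastFrom, dif_neg (by omega)]
        simp
  exact fun i x => H (s.length - i) i x (le_refl _)

theorem pvDot_B (s : List Char) : ∀ (j : Nat) (d : Int),
    pvDotLoop (s.drop j) j d =
    (match pvLastFrom s j with | some j' => (j' : Int) | none => d) := by
  have H : ∀ n j d, s.length - j ≤ n →
      pvDotLoop (s.drop j) j d =
      (match pvLastFrom s j with | some j' => (j' : Int) | none => d) := by
    intro n
    induction n with
    | zero =>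
      intro j d hn
      rw [List.drop_eq_nil_of_le (by omega), pvLastFrom, dif_neg (by omega)]
      rfl
    | succ n ih =>
      intro j d hn
      by_cases hj : j < s.length
      · have hLF : pvLastFrom s j =
            (match pvLastFrom s (j + 1) with
             | some j' => some j'
             | none => if s.getD j ' ' == '.' then some j else none) := by
          conv_lhs => rw [pvLastFrom]
          rw [dif_pos hj]
        rw [List.drop_eq_getElem_cons hj, pvDotLoop, ih (j+1) _ (by omega), hLF]
        have hg : s[j] = s.getD j ' ' := by
          rw [List.getD_eq_getElem?_getD, List.getElem?_eq_getElem hj]; rfl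
        cases hlf : pvLastFrom s (j+1) with
        | some j' => simp
        | none => simp only [hg]; split <;> simp
      · rw [List.drop_eq_nil_of_le (by omega), pvLastFrom, dif_neg (by omega)]
        rfl
  exact fun j d => H (s.length - j) j d (le_refl _)

def pvQP (s : List Char) (j : Nat) : Bool := pvEv s j && s.getD j ' ' == '"'
def pvBP (s : List Char) (j : Nat) : Bool := pvEv s j && s.getD j ' ' == '('
def pvOpener (s : List Char) (j : Nat) : Bool := pvQP s j || pvBP s j

theorem pvGetD_drop (s : List Char) (m i : Nat) :
    (s.drop m).getD i ' ' = s.getD (m + i) ' ' := by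
  rw [List.getD_eq_getElem?_getD, List.getD_eq_getElem?_getD, List.getElem?_drop]

theorem pvEv_drop (s : List Char) (m : Nat)
    (hm : m = 0 ∨ s.getD (m - 1) ' ' ≠ '\\') (k : Nat) :
    pvEv (s.drop m) k = pvEv s (m + k) := by
  unfold pvEv; rw [pvBsRun_drop s m hm k]

theorem pvFirst_unfold (s : List Char) (p : Nat → Bool) (i : Nat) (h : i < s.length) :
    pvFirst s p i = if p i then some i else pvFirst s p (i + 1) := by
  conv_lhs => rw [pvFirst]
  rw [dif_pos h]

theorem pvCQLoop_eq (s : List Char) (m : Nat)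
    (hm : m = 0 ∨ s.getD (m - 1) ' ' ≠ '\\') :
    ∀ rem i, rem = (s.drop m).drop i →
      pvCQLoop (s.drop m) rem i =
        (match pvFirst s (pvQP s) (m + i) with
         | some j => ((j - m : Nat) : Int)
         | none => -1) := by
  intro rem
  induction rem with
  | nil =>
    intro i hrem
    have hlen : s.length ≤ m + i := by
      have := congrArg List.length hrem; simp at this; omega
    rw [pvFirst_ge _ _ _ hlen]
    rfl
  | cons x rest ih =>
    intro i hrem
    have hlen : i < (s.drop m).length := by
      have := congrArg List.length hrem; simp at this
      simp; omega
    have hmi : m + i < s.length := by simp at hlen; omega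
    rw [pvCQLoop, pvUnb_eq _ _ hlen, pvEv_drop s m hm i, pvGetD_drop]
    have hcond : (pvEv s (m + i) && (s.getD (m + i) ' ' == '"')) = pvQP s (m + i) := rfl
    rw [hcond, pvFirst_unfold s _ _ hmi]
    by_cases hq : pvQP s (m + i) = true
    · rw [if_pos hq, if_pos hq]
      simp
    · rw [if_neg (by simpa using hq), if_neg (by simpa using hq)]
      have hrest : rest = (s.drop m).drop (i + 1) := by
        have h1 : ((s.drop m).drop i).tail = rest := by rw [← hrem]; rfl
        rw [← h1, List.tail_drop]
      rw [ih (i + 1) hrest, Nat.add_assoc]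
  
theorem pvCloseQuote_eq (s : List Char) (a : Nat) (ha : a < s.length)
    (hch : s.getD a ' ' ≠ '\\') :
    pvCloseQuote s (a : Int) =
      (match pvFirst s (pvQP s) (a + 1) with
       | some j => some ((j : Int))
       | none => none) := by
  unfold pvCloseQuote
  have hsl : PySem.List.slice s (some ((a : Int) + 1)) none = s.drop (a + 1) := by
    have : ((a : Int) + 1) = ((a + 1 : Nat) : Int) := by push_cast; ring
    rw [this, PySem.List.slice_from_natCast]
  simp only [hsl]
  have hdr : s.drop (a + 1) = (s.drop (a + 1)).drop 0 := rfl
  rw [pvCQLoop_eq s (a + 1) (Or.inr (by simpa using hch)) _ 0 hdr]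
  cases hf : pvFirst s (pvQP s) (a + 1 + 0) with
  | none => simp
  | some j =>
    obtain ⟨hj1, hj2, _, _⟩ := pvFirst_some s _ _ _ hf
    have hji : ((j - (a + 1) : Nat) : Int) ≠ -1 := by omega
    simp only
    rw [if_neg (by simpa using hji)]
    have hc : ((j - (a + 1) : Nat) : Int) = (j : Int) - (a : Int) - 1 := by omega
    rw [hc]
    congr 1
    ring

def pvCEx (s : List Char) (j d : Nat) : Option Nat :=
  if _h : j < s.length then
    (if pvEv s j && (s.getD j ' ' == '(') then pvCEx s (j + 1) (d + 1)
     else if pvEv s j && (s.getD j ' ' == ')') then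
       (if d == 1 then some j else pvCEx s (j + 1) (d - 1))
     else pvCEx s (j + 1) d)
  else none
termination_by s.length - j

theorem pvCEx_unfold (s : List Char) (j d : Nat) (h : j < s.length) :
    pvCEx s j d =
      (if pvEv s j && (s.getD j ' ' == '(') then pvCEx s (j + 1) (d + 1)
       else if pvEv s j && (s.getD j ' ' == ')') then
         (if d == 1 then some j else pvCEx s (j + 1) (d - 1))
       else pvCEx s (j + 1) d) := by
  conv_lhs => rw [pvCEx]
  rw [dif_pos h]

theorem pvCEx_ge_len (s : List Char) (j d : Nat) (h : s.length ≤ j) : pvCEx s j d = none := by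
  rw [pvCEx, dif_neg (by omega)]

theorem pvCEx_spec (s : List Char) :
    ∀ n j d b, s.length - j ≤ n → pvCEx s j d = some b →
      j ≤ b ∧ b < s.length ∧ pvEv s b = true ∧ s.getD b ' ' = ')' := by
  intro n
  induction n with
  | zero =>
    intro j d b hn hf
    rw [pvCEx_ge_len s j d (by omega)] at hf; exact absurd hf (by simp)
  | succ n ih =>
    intro j d b hn hf
    by_cases hj : j < s.length
    · rw [pvCEx_unfold s j d hj] at hf
      by_cases h1 : (pvEv s j && (s.getD j ' ' == '(')) = true
      · rw [if_pos h1] at hf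
        obtain ⟨hb1, hb2, hb3, hb4⟩ := ih (j+1) (d+1) b (by omega) hf
        exact ⟨by omega, hb2, hb3, hb4⟩
      · rw [if_neg h1] at hf
        by_cases h2 : (pvEv s j && (s.getD j ' ' == ')')) = true
        · rw [if_pos h2] at hf
          by_cases hd : (d == 1) = true
          · rw [if_pos hd] at hf
            obtain rfl : j = b := by injection hf
            refine ⟨le_refl _, hj, ?_, ?_⟩
            · exact (Bool.and_eq_true _ _ |>.mp h2).1
            · have := (Bool.and_eq_true _ _ |>.mp h2).2; simpa using this
          · rw [if_neg hd] at hf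
            obtain ⟨hb1, hb2, hb3, hb4⟩ := ih (j+1) (d-1) b (by omega) hf
            exact ⟨by omega, hb2, hb3, hb4⟩
        · rw [if_neg h2] at hf
          obtain ⟨hb1, hb2, hb3, hb4⟩ := ih (j+1) d b (by omega) hf
          exact ⟨by omega, hb2, hb3, hb4⟩
    · rw [pvCEx_ge_len s j d (by omega)] at hf; exact absurd hf (by simp)

theorem pvCBLoop_zero (check : List Char) (rem : List Char) (i : Nat) (cb : Int) :
    pvCBLoop check rem i 0 cb = (0, cb) := by
  cases rem with
  | nil => rfl
  | cons x rest => rw [pvCBLoop, if_pos (by simp)]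

theorem pvCBLoop_some (s : List Char) (m : Nat)
    (hm : m = 0 ∨ s.getD (m - 1) ' ' ≠ '\\') :
    ∀ rem i (d : Nat) (cb : Int) (b : Nat), rem = (s.drop m).drop i → 1 ≤ d →
      pvCEx s (m + i) d = some b →
      pvCBLoop (s.drop m) rem i (d : Int) cb = (0, ((b - m : Nat) : Int)) := by
  intro rem
  induction rem with
  | nil =>
    intro i d cb b hrem hd hf
    have hlen : s.length ≤ m + i := by
      have := congrArg List.length hrem; simp at this; omega
    rw [pvCEx_ge_len s _ d hlen] at hf; exact absurd hf (by simp)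
  | cons x rest ih =>
    intro i d cb b hrem hd hf
    have hlen : i < (s.drop m).length := by
      have := congrArg List.length hrem; simp at this; simp; omega
    have hmi : m + i < s.length := by simp at hlen; omega
    have hrest : rest = (s.drop m).drop (i + 1) := by
      have h1 : ((s.drop m).drop i).tail = rest := by rw [← hrem]; rfl
      rw [← h1, List.tail_drop]
    rw [pvCBLoop, if_neg (by simp; omega), pvUnb_eq _ _ hlen, pvEv_drop s m hm i, pvGetD_drop]
    rw [pvCEx_unfold s (m + i) d hmi] at hf
    by_cases hev : pvEv s (m + i) = true
    · rw [hev, if_pos (by simp)]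
      by_cases h1 : (s.getD (m + i) ' ' == '(') = true
      · rw [if_pos h1]
        rw [if_pos (by rw [hev, h1]; rfl)] at hf
        have : ((d : Int) + 1) = ((d + 1 : Nat) : Int) := by push_cast; ring
        rw [this]
        exact ih (i + 1) (d + 1) cb b hrest (by omega) (by rw [← Nat.add_assoc]; exact hf)
      · rw [if_neg h1]
        have h1f : (s.getD (m + i) ' ' == '(') = false := by
          revert h1; cases (s.getD (m + i) ' ' == '(') <;> simp
        rw [if_neg (by rw [hev, h1f]; simp)] at hf
        by_cases h2 : (s.getD (m + i) ' ' == ')') = true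
        · rw [if_pos h2]
          rw [if_pos (by rw [hev, h2]; rfl)] at hf
          by_cases hd1 : d = 1
          · subst hd1
            rw [if_pos (by simp)] at hf
            obtain rfl : m + i = b := by injection hf
            have he : ((1 : Nat) : Int) - 1 = ((0 : Nat) : Int) := by norm_num
            rw [he, Nat.cast_zero, pvCBLoop_zero]
            congr 1
            omega
          · rw [if_neg (by simpa using hd1)] at hf
            have : ((d : Int) - 1) = ((d - 1 : Nat) : Int) := by omega
            rw [this]
            exact ih (i + 1) (d - 1) (i : Int) b hrest (by omega) (by rw [← Nat.add_assoc]; exact hf)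
        · rw [if_neg h2]
          have h2f : (s.getD (m + i) ' ' == ')') = false := by
            revert h2; cases (s.getD (m + i) ' ' == ')') <;> simp
          rw [if_neg (by rw [hev, h2f]; simp)] at hf
          exact ih (i + 1) d cb b hrest hd (by rw [← Nat.add_assoc]; exact hf)
    · have hevf : pvEv s (m + i) = false := by simpa using hev
      rw [hevf, if_neg (by simp)]
      rw [if_neg (by rw [hevf]; simp), if_neg (by rw [hevf]; simp)] at hf
      exact ih (i + 1) d cb b hrest hd (by rw [← Nat.add_assoc]; exact hf)

theorem pvCBLoop_none (s : List Char) (m : Nat)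
    (hm : m = 0 ∨ s.getD (m - 1) ' ' ≠ '\\') :
    ∀ rem i (d : Nat) (cb : Int), rem = (s.drop m).drop i → 1 ≤ d →
      pvCEx s (m + i) d = none →
      1 ≤ (pvCBLoop (s.drop m) rem i (d : Int) cb).1 := by
  intro rem
  induction rem with
  | nil =>
    intro i d cb hrem hd hf
    rw [pvCBLoop]
    simpa using (by omega : (1 : Int) ≤ (d : Int))
  | cons x rest ih =>
    intro i d cb hrem hd hf
    have hlen : i < (s.drop m).length := by
      have := congrArg List.length hrem; simp at this; simp; omega
    have hmi : m + i < s.length := by simp at hlen; omega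
    have hrest : rest = (s.drop m).drop (i + 1) := by
      have h1 : ((s.drop m).drop i).tail = rest := by rw [← hrem]; rfl
      rw [← h1, List.tail_drop]
    rw [pvCBLoop, if_neg (by simp; omega), pvUnb_eq _ _ hlen, pvEv_drop s m hm i, pvGetD_drop]
    rw [pvCEx_unfold s (m + i) d hmi] at hf
    by_cases hev : pvEv s (m + i) = true
    · rw [hev, if_pos (by simp)]
      by_cases h1 : (s.getD (m + i) ' ' == '(') = true
      · rw [if_pos h1]
        rw [if_pos (by rw [hev, h1]; rfl)] at hf
        have : ((d : Int) + 1) = ((d + 1 : Nat) : Int) := by push_cast; ring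
        rw [this]
        exact ih (i + 1) (d + 1) cb hrest (by omega) (by rw [← Nat.add_assoc]; exact hf)
      · rw [if_neg h1]
        have h1f : (s.getD (m + i) ' ' == '(') = false := by
          revert h1; cases (s.getD (m + i) ' ' == '(') <;> simp
        rw [if_neg (by rw [hev, h1f]; simp)] at hf
        by_cases h2 : (s.getD (m + i) ' ' == ')') = true
        · rw [if_pos h2]
          rw [if_pos (by rw [hev, h2]; rfl)] at hf
          by_cases hd1 : d = 1
          · subst hd1
            rw [if_pos (by simp)] at hf
            exact absurd hf (by simp)
          · rw [if_neg (by simpa using hd1)] at hf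
            have : ((d : Int) - 1) = ((d - 1 : Nat) : Int) := by omega
            rw [this]
            exact ih (i + 1) (d - 1) (i : Int) hrest (by omega) (by rw [← Nat.add_assoc]; exact hf)
        · rw [if_neg h2]
          have h2f : (s.getD (m + i) ' ' == ')') = false := by
            revert h2; cases (s.getD (m + i) ' ' == ')') <;> simp
          rw [if_neg (by rw [hev, h2f]; simp)] at hf
          exact ih (i + 1) d cb hrest hd (by rw [← Nat.add_assoc]; exact hf)
    · have hevf : pvEv s (m + i) = false := by simpa using hev
      rw [hevf, if_neg (by simp)]
      rw [if_neg (by rw [hevf]; simp), if_neg (by rw [hevf]; simp)] at hf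
      exact ih (i + 1) d cb hrest hd (by rw [← Nat.add_assoc]; exact hf)

theorem pvCloseBracket_eq (s : List Char) (a : Nat) (ha : a < s.length)
    (hch : s.getD a ' ' ≠ '\\') :
    pvCloseBracket s (a : Int) =
      (match pvCEx s (a + 1) 1 with
       | some b => some ((b : Int))
       | none => none) := by
  unfold pvCloseBracket
  have hsl : PySem.List.slice s (some ((a : Int) + 1)) none = s.drop (a + 1) := by
    have : ((a : Int) + 1) = ((a + 1 : Nat) : Int) := by push_cast; ring
    rw [this, PySem.List.slice_from_natCast]
  simp only [hsl]
  have hm : (a + 1) = 0 ∨ s.getD ((a + 1) - 1) ' ' ≠ '\\' := Or.inr (by simpa using hch)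
  cases hf : pvCEx s (a + 1) 1 with
  | some b =>
    have hone : ((1 : Nat) : Int) = 1 := rfl
    have := pvCBLoop_some s (a + 1) hm (s.drop (a + 1)) 0 1 (-1) b rfl (le_refl 1)
      (by simpa using hf)
    rw [hone] at this
    rw [this]
    obtain ⟨hb1, hb2, _, _⟩ := pvCEx_spec s (s.length - (a + 1)) (a + 1) 1 b (le_refl _)
      (by simpa using hf)
    have hcond : ¬ (((((0:Int), ((b - (a + 1) : Nat) : Int)).2 == -1) ||
        ((((0:Int), ((b - (a + 1) : Nat) : Int)).1 != 0))) = true) := by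
      simp
    rw [if_neg hcond]
    have hc2 : ((b - (a + 1) : Nat) : Int) = (b : Int) - (a : Int) - 1 := by omega
    rw [hc2]
    congr 1
    ring
  | none =>
    have := pvCBLoop_none s (a + 1) hm (s.drop (a + 1)) 0 1 (-1) rfl (le_refl 1)
      (by simpa using hf)
    have hone : ((1 : Nat) : Int) = 1 := rfl
    rw [hone] at this
    have hcond : ((pvCBLoop (s.drop (a+1)) (s.drop (a+1)) 0 1 (-1)).2 == -1 ||
        (pvCBLoop (s.drop (a+1)) (s.drop (a+1)) 0 1 (-1)).1 != 0) = true := by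
      simp
      omega
    rw [if_pos hcond]

set_option maxHeartbeats 1000000 in
theorem pvOQB_eq (s : List Char) :
    pvOQB s = ((match pvFirst s (pvQP s) 0 with | some j => (j : Int) | none => -1),
               (match pvFirst s (pvBP s) 0 with | some j => (j : Int) | none => -1)) := by
  have H : ∀ n i (st : Int × Int), s.length - i ≤ n →
      (List.range' i (s.length - i)).foldl
        (fun st ch =>
          if pvUnb s ch then
            ((if s.getD ch ' ' == '"' && st.1 == -1 then (ch : Int) else st.1),
             (if s.getD ch ' ' == '(' && st.2 == -1 then (ch : Int) else st.2))
          else st) st =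
      ((if st.1 == -1 then (match pvFirst s (pvQP s) i with | some j => (j : Int) | none => -1) else st.1),
       (if st.2 == -1 then (match pvFirst s (pvBP s) i with | some j => (j : Int) | none => -1) else st.2)) := by
    intro n
    induction n with
    | zero =>
      intro i st hn
      have h0 : s.length - i = 0 := by omega
      rw [h0, pvFirst_ge _ _ _ (by omega), pvFirst_ge _ _ _ (by omega)]
      simp only [List.range'_zero, List.foldl_nil]
      cases st with
      | mk s1 s2 =>
        by_cases h1 : s1 = -1 <;> by_cases h2 : s2 = -1 <;>
          simp [h1, h2]
    | succ n ih =>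
      intro i st hn
      by_cases hi : i < s.length
      · have hr : s.length - i = (s.length - (i + 1)) + 1 := by omega
        rw [hr, List.range'_succ, List.foldl_cons, ih (i + 1) _ (by omega)]
        rw [pvFirst_unfold s (pvQP s) i hi, pvFirst_unfold s (pvBP s) i hi]
        rw [pvUnb_eq s i hi]
        by_cases hu : pvEv s i = true
        · rw [hu, if_pos rfl]
          have hqp : pvQP s i = (s.getD i ' ' == '"') := by simp [pvQP, hu]
          have hbp : pvBP s i = (s.getD i ' ' == '(') := by simp [pvBP, hu]
          rw [hqp, hbp]
          clear ih hn hr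
          cases st with
          | mk s1 s2 =>
            by_cases h1 : s1 = -1 <;> by_cases h2 : s2 = -1 <;>
              by_cases hq : (s.getD i ' ' == '"') = true <;>
                by_cases hb : (s.getD i ' ' == '(') = true <;>
                  simp [h1, h2, hq, hb] <;> (try (split <;> simp_all))
        · have huf : pvEv s i = false := by simpa using hu
          rw [huf, if_neg (show ¬ (false = true) by simp)]
          have hqp : pvQP s i = false := by simp [pvQP, huf]
          have hbp : pvBP s i = false := by simp [pvBP, huf]
          rw [hqp, hbp]
          clear ih hn hr
          by_cases h1 : st.1 = -1 <;> by_cases h2 : st.2 = -1 <;> simp [h1, h2]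
      · have h0 : s.length - i = 0 := by omega
        rw [h0, pvFirst_ge _ _ _ (by omega), pvFirst_ge _ _ _ (by omega)]
        simp only [List.range'_zero, List.foldl_nil]
        cases st with
        | mk s1 s2 =>
          by_cases h1 : s1 = -1 <;> by_cases h2 : s2 = -1 <;>
            simp [h1, h2]
  unfold pvOQB
  rw [List.range_eq_range']
  have := H s.length 0 (-1, -1) (by omega)
  rw [Nat.sub_zero] at this
  rw [this]
  simp

theorem pvGetD_at (s : List Char) (j : Nat) (h : j < s.length) : s.getD j ' ' = s[j] := by
  rw [List.getD_eq_getElem?_getD, List.getElem?_eq_getElem h]; rfl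

theorem pvEv_step (s : List Char) (j : Nat) (h : j < s.length) :
    (if s[j] == '\\' then !(pvEv s j) else true) = pvEv s (j + 1) := by
  rw [← pvGetD_at s j h, pvEv_succ]

theorem pvScan_prefix (s : List Char) (a : Nat) (ha : a ≤ s.length) :
    ∀ i, i ≤ a → (∀ j, i ≤ j → j < a → pvOpener s j = false) →
    pvScan (s.drop i) (pvEv s i) .mout =
      (((s.drop i).take (a - i)) ++ (pvScan (s.drop a) (pvEv s a) .mout).1,
       (pvScan (s.drop a) (pvEv s a) .mout).2) := by
  have H : ∀ n i, a - i ≤ n → i ≤ a → (∀ j, i ≤ j → j < a → pvOpener s j = false) →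
      pvScan (s.drop i) (pvEv s i) .mout =
        (((s.drop i).take (a - i)) ++ (pvScan (s.drop a) (pvEv s a) .mout).1,
         (pvScan (s.drop a) (pvEv s a) .mout).2) := by
    intro n
    induction n with
    | zero =>
      intro i hn hia _
      obtain rfl : i = a := by omega
      simp
    | succ n ih =>
      intro i hn hia hop
      rcases Nat.eq_or_lt_of_le hia with rfl | hlt
      · simp
      · have hi : i < s.length := by omega
        have hqf : (pvEv s i && (s[i] == '"')) = false := by
          have := hop i (le_refl _) hlt
          rw [pvOpener, pvQP, pvBP, pvGetD_at s i hi] at this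
          rcases Bool.or_eq_false_iff.mp this with ⟨h1, _⟩
          exact h1
        have hbf : (pvEv s i && (s[i] == '(')) = false := by
          have := hop i (le_refl _) hlt
          rw [pvOpener, pvQP, pvBP, pvGetD_at s i hi] at this
          rcases Bool.or_eq_false_iff.mp this with ⟨_, h2⟩
          exact h2
        rw [List.drop_eq_getElem_cons hi]
        simp only [pvScan]
        rw [hqf, hbf]
        simp only [Bool.false_eq_true, if_false]
        rw [pvEv_step s i hi, ih (i + 1) (by omega) (by omega)
          (fun j hj1 hj2 => hop j (by omega) hj2)]
        have hsub : a - i = (a - (i + 1)) + 1 := by omega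
        rw [hsub, List.take_succ_cons]
        rfl
  exact fun i => H (a - i) i (le_refl _)

theorem pvScan_q_some (s : List Char) (b : Nat) :
    ∀ j, pvFirst s (pvQP s) j = some b →
    pvScan (s.drop j) (pvEv s j) .mq =
      (List.replicate (b + 1 - j) 'q' ++ (pvScan (s.drop (b + 1)) (pvEv s (b + 1)) .mout).1,
       (pvScan (s.drop (b + 1)) (pvEv s (b + 1)) .mout).2) := by
  have H : ∀ n j, s.length - j ≤ n → pvFirst s (pvQP s) j = some b →
      pvScan (s.drop j) (pvEv s j) .mq =
        (List.replicate (b + 1 - j) 'q' ++ (pvScan (s.drop (b + 1)) (pvEv s (b + 1)) .mout).1,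
         (pvScan (s.drop (b + 1)) (pvEv s (b + 1)) .mout).2) := by
    intro n
    induction n with
    | zero =>
      intro j hn hf
      obtain ⟨h1, h2, _, _⟩ := pvFirst_some s _ _ _ hf
      omega
    | succ n ih =>
      intro j hn hf
      obtain ⟨hjb, hblen, hqb, hmin⟩ := pvFirst_some s _ _ _ hf
      have hj : j < s.length := by omega
      rw [pvFirst_unfold s _ _ hj] at hf
      rw [List.drop_eq_getElem_cons hj]
      simp only [pvScan]
      by_cases hq : pvQP s j = true
      · rw [if_pos hq] at hf
        obtain rfl : j = b := by injection hf
        have hcq : (pvEv s j && (s[j] == '"')) = true := by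
          rw [← pvGetD_at s j hj]; exact hq
        rw [hcq]
        simp only [if_pos rfl]
        rw [pvEv_step s j hj]
        have : j + 1 - j = 1 := by omega
        rw [this]
        rfl
      · rw [if_neg hq] at hf
        have hqf : (pvEv s j && (s[j] == '"')) = false := by
          rw [← pvGetD_at s j hj]
          exact Bool.eq_false_iff.mpr hq
        rw [hqf]
        simp only [Bool.false_eq_true, if_false]
        rw [pvEv_step s j hj, ih (j + 1) (by omega) hf]
        have hb1 : b + 1 - j = (b + 1 - (j + 1)) + 1 := by omega
        rw [hb1, List.replicate_succ]
        rfl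
  exact fun j => H (s.length - j) j (le_refl _)

theorem pvScan_q_none (s : List Char) :
    ∀ j, pvFirst s (pvQP s) j = none →
    (pvScan (s.drop j) (pvEv s j) .mq).2 = .mq := by
  have H : ∀ n j, s.length - j ≤ n → pvFirst s (pvQP s) j = none →
      (pvScan (s.drop j) (pvEv s j) .mq).2 = .mq := by
    intro n
    induction n with
    | zero =>
      intro j hn _
      rw [List.drop_eq_nil_of_le (by omega)]
      rfl
    | succ n ih =>
      intro j hn hf
      by_cases hj : j < s.length
      · rw [pvFirst_unfold s _ _ hj] at hf
        by_cases hq : pvQP s j = true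
        · rw [if_pos hq] at hf; exact absurd hf (by simp)
        · rw [if_neg hq] at hf
          have hqf : (pvEv s j && (s[j] == '"')) = false := by
            rw [← pvGetD_at s j hj]
            exact Bool.eq_false_iff.mpr hq
          rw [List.drop_eq_getElem_cons hj]
          simp only [pvScan]
          rw [hqf]
          simp only [Bool.false_eq_true, if_false]
          rw [pvEv_step s j hj]
          exact ih (j + 1) (by omega) hf
      · rw [List.drop_eq_nil_of_le (by omega)]
        rfl
  exact fun j => H (s.length - j) j (le_refl _)

theorem pvScan_c_some (s : List Char) (b : Nat) :
    ∀ n j d, s.length - j ≤ n → 1 ≤ d → pvCEx s j d = some b →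
    pvScan (s.drop j) (pvEv s j) (.mc d) =
      (List.replicate (b + 1 - j) 'c' ++ (pvScan (s.drop (b + 1)) (pvEv s (b + 1)) .mout).1,
       (pvScan (s.drop (b + 1)) (pvEv s (b + 1)) .mout).2) := by
  intro n
  induction n with
  | zero =>
    intro j d hn hd hf
    rw [pvCEx_ge_len s j d (by omega)] at hf; exact absurd hf (by simp)
  | succ n ih =>
    intro j d hn hd hf
    by_cases hj : j < s.length
    · obtain ⟨hjb, hblen, _, hparb⟩ := pvCEx_spec s (s.length - j) j d b (le_refl _) hf
      rw [pvCEx_unfold s j d hj] at hf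
      rw [List.drop_eq_getElem_cons hj]
      simp only [pvScan]
      by_cases h1 : (pvEv s j && (s.getD j ' ' == '(')) = true
      · rw [if_pos h1] at hf
        have h1' : (pvEv s j && (s[j] == '(')) = true := by rw [← pvGetD_at s j hj]; exact h1
        rw [h1']
        simp only [if_pos rfl]
        rw [pvEv_step s j hj, ih (j + 1) (d + 1) (by omega) (by omega) hf]
        have hb1 : b + 1 - j = (b + 1 - (j + 1)) + 1 := by
          have : j ≠ b := by
            intro he; subst he
            rw [pvGetD_at s j hj] at hparb
            have := (Bool.and_eq_true _ _ |>.mp h1').2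
            simp [hparb] at this
          omega
        rw [hb1, List.replicate_succ]
        rfl
      · rw [if_neg h1] at hf
        have h1' : (pvEv s j && (s[j] == '(')) = false := by
          rw [← pvGetD_at s j hj]; exact Bool.eq_false_iff.mpr h1
        rw [h1']
        simp only [Bool.false_eq_true, if_false]
        by_cases h2 : (pvEv s j && (s.getD j ' ' == ')')) = true
        · rw [if_pos h2] at hf
          have h2' : (pvEv s j && (s[j] == ')')) = true := by rw [← pvGetD_at s j hj]; exact h2
          rw [h2']
          simp only [if_pos rfl]
          by_cases hd1 : d = 1
          · subst hd1
            rw [if_pos (by simp)] at hf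
            obtain rfl : j = b := by injection hf
            rw [if_pos (by simp)]
            rw [pvEv_step s j hj]
            have : j + 1 - j = 1 := by omega
            rw [this]
            rfl
          · have hdb : (d == 1) = false := beq_eq_false_iff_ne.mpr hd1
            rw [hdb] at hf
            rw [hdb]
            simp only [Bool.false_eq_true, if_false] at hf ⊢
            rw [pvEv_step s j hj, ih (j + 1) (d - 1) (by omega) (by omega) hf]
            have hb1 : b + 1 - j = (b + 1 - (j + 1)) + 1 := by omega
            rw [hb1, List.replicate_succ]
            rfl
        · rw [if_neg h2] at hf
          have h2' : (pvEv s j && (s[j] == ')')) = false := by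
            rw [← pvGetD_at s j hj]; exact Bool.eq_false_iff.mpr h2
          rw [h2']
          simp only [Bool.false_eq_true, if_false]
          rw [pvEv_step s j hj, ih (j + 1) d (by omega) (by omega) hf]
          have hb1 : b + 1 - j = (b + 1 - (j + 1)) + 1 := by omega
          rw [hb1, List.replicate_succ]
          rfl
    · rw [pvCEx_ge_len s j d (by omega)] at hf; exact absurd hf (by simp)

theorem pvScan_c_none (s : List Char) :
    ∀ n j d, s.length - j ≤ n → 1 ≤ d → pvCEx s j d = none →
    (pvScan (s.drop j) (pvEv s j) (.mc d)).2 ≠ .mout := by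
  intro n
  induction n with
  | zero =>
    intro j d hn hd _
    rw [List.drop_eq_nil_of_le (by omega)]
    simp [pvScan]
  | succ n ih =>
    intro j d hn hd hf
    by_cases hj : j < s.length
    · rw [pvCEx_unfold s j d hj] at hf
      rw [List.drop_eq_getElem_cons hj]
      simp only [pvScan]
      by_cases h1 : (pvEv s j && (s.getD j ' ' == '(')) = true
      · rw [if_pos h1] at hf
        have h1' : (pvEv s j && (s[j] == '(')) = true := by rw [← pvGetD_at s j hj]; exact h1
        rw [h1']
        simp only [if_pos rfl]
        rw [pvEv_step s j hj]
        exact ih (j + 1) (d + 1) (by omega) (by omega) hf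
      · rw [if_neg h1] at hf
        have h1' : (pvEv s j && (s[j] == '(')) = false := by
          rw [← pvGetD_at s j hj]; exact Bool.eq_false_iff.mpr h1
        rw [h1']
        simp only [Bool.false_eq_true, if_false]
        by_cases h2 : (pvEv s j && (s.getD j ' ' == ')')) = true
        · rw [if_pos h2] at hf
          have h2' : (pvEv s j && (s[j] == ')')) = true := by rw [← pvGetD_at s j hj]; exact h2
          rw [h2']
          simp only [if_pos rfl]
          by_cases hd1 : d = 1
          · subst hd1
            rw [if_pos (by simp)] at hf
            exact absurd hf (by simp)
          · have hdb : (d == 1) = false := beq_eq_false_iff_ne.mpr hd1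
            rw [hdb] at hf
            rw [hdb]
            simp only [Bool.false_eq_true, if_false] at hf ⊢
            rw [pvEv_step s j hj]
            exact ih (j + 1) (d - 1) (by omega) (by omega) hf
        · rw [if_neg h2] at hf
          have h2' : (pvEv s j && (s[j] == ')')) = false := by
            rw [← pvGetD_at s j hj]; exact Bool.eq_false_iff.mpr h2
          rw [h2']
          simp only [Bool.false_eq_true, if_false]
          rw [pvEv_step s j hj]
          exact ih (j + 1) d (by omega) (by omega) hf
    · rw [List.drop_eq_nil_of_le (by omega)]
      simp [pvScan]

theorem pvBsRun_prefix (s t : List Char) (a : Nat)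
    (hpre : ∀ j, j < a → t.getD j ' ' = s.getD j ' ') :
    ∀ k, k ≤ a → pvBsRun t k = pvBsRun s k := by
  intro k
  induction k with
  | zero => intro _; rfl
  | succ k ih =>
    intro hk
    rw [pvBsRun, pvBsRun, hpre k (by omega), ih (by omega)]

theorem pvGetD_take (s : List Char) (a j : Nat) (h : j < a) :
    (s.take a).getD j ' ' = s.getD j ' ' := by
  rw [List.getD_eq_getElem?_getD, List.getD_eq_getElem?_getD, List.getElem?_take_of_lt h]

theorem pvCount_replicate (c f : Char) (n : Nat) (h : ¬ c = f) :
    (List.replicate n f).count c = 0 := by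
  simp [List.count_replicate]
  intro hh
  exact absurd hh.symm h

theorem pvStep_main (s : List Char) (a b : Nat) (f : Char)
    (hfqc : f = 'q' ∨ f = 'c')
    (ha : a < s.length) (hab : a + 1 ≤ b) (hblen : b < s.length)
    (hpref : ∀ j, j < a → pvOpener s j = false)
    (hopa : s.getD a ' ' = '"' ∨ s.getD a ' ' = '(')
    (hclose : pvScan (s.drop a) (pvEv s a) .mout =
      (List.replicate (b + 1 - a) f ++ (pvScan (s.drop (b + 1)) true .mout).1,
       (pvScan (s.drop (b + 1)) true .mout).2)) :
    pvScan s true .mout =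
      (s.take a ++ List.replicate (b + 1 - a) f ++ (pvScan (s.drop (b + 1)) true .mout).1,
       (pvScan (s.drop (b + 1)) true .mout).2) ∧
    pvScan (pvReplacePart s (a : Int) (b : Int) f) true .mout = pvScan s true .mout ∧
    (pvReplacePart s (a : Int) (b : Int) f).count '"' +
      (pvReplacePart s (a : Int) (b : Int) f).count '(' < s.count '"' + s.count '(' := by
  have hfq : ¬ ('"' : Char) = f := by rcases hfqc with rfl | rfl <;> decide
  have hfb : ¬ ('(' : Char) = f := by rcases hfqc with rfl | rfl <;> decide
  have hfbs : ¬ f = '\\' := by rcases hfqc with rfl | rfl <;> decide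
  -- the replaced string decomposes
  have hL1 : 1 ≤ b + 1 - a := by omega
  have e1 : pvReplacePart s (a : Int) (b : Int) f =
      s.take a ++ List.replicate (b + 1 - a) f ++ s.drop (b + 1) := by
    unfold pvReplacePart
    have h1 : PySem.List.slice s none (some (a : Int)) = s.take a :=
      PySem.List.slice_to_natCast s a
    have h2 : ((b : Int) + 1) = ((b + 1 : Nat) : Int) := by push_cast; ring
    have h3 : PySem.List.slice s (some ((b : Int) + 1)) none = s.drop (b + 1) := by
      rw [h2, PySem.List.slice_from_natCast]
    have h4 : PySem.List.slice s (some (a : Int)) (some ((b : Int) + 1)) =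
        (s.drop a).take (b + 1 - a) := by
      rw [h2, PySem.List.slice_natCast]
    have h5 : ((s.drop a).take (b + 1 - a)).length = b + 1 - a := by
      simp
      omega
    rw [h1, h3, h4]
    simp only [h5]
  set P := s.take a with hP
  set F := List.replicate (b + 1 - a) f with hF
  set Suf := s.drop (b + 1) with hSuf
  have hPlen : P.length = a := by simp [hP]; omega
  have hFlen : F.length = b + 1 - a := by simp [hF]
  have hPFlen : (P ++ F).length = b + 1 := by simp [hPlen, hFlen]; omega
  have hslen : (pvReplacePart s (a : Int) (b : Int) f).length = s.length := by
    rw [e1]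
    simp [hPlen, hFlen, hSuf]
    omega
  -- characters of the replaced string
  have g1 : ∀ j, j < a → (pvReplacePart s (a : Int) (b : Int) f).getD j ' ' = s.getD j ' ' := by
    intro j hj
    rw [e1, List.append_assoc, List.getD_append _ _ _ _ (by omega), hP, pvGetD_take s a j hj]
  have g2 : ∀ j, a ≤ j → j < b + 1 →
      (pvReplacePart s (a : Int) (b : Int) f).getD j ' ' = f := by
    intro j hj1 hj2
    rw [e1]
    rw [List.getD_append _ _ _ _ (by rw [hPFlen]; omega)]
    rw [List.getD_append_right _ _ _ _ (by rw [hPlen]; omega), hF,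
      List.getD_replicate _ (by rw [hPlen]; omega)]
  -- parity transport on the common prefix
  have hbs : ∀ k, k ≤ a → pvBsRun (pvReplacePart s (a : Int) (b : Int) f) k = pvBsRun s k :=
    pvBsRun_prefix s _ a (fun j hj => g1 j hj)
  -- no opener in the replaced string before b+1
  have hop' : ∀ j, j < b + 1 → pvOpener (pvReplacePart s (a : Int) (b : Int) f) j = false := by
    intro j hj
    by_cases hja : j < a
    · have hEv : pvEv (pvReplacePart s (a : Int) (b : Int) f) j = pvEv s j := by
        unfold pvEv
        rw [hbs j (by omega)]
      rw [pvOpener, pvQP, pvBP, hEv, g1 j hja]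
      have := hpref j hja
      rw [pvOpener, pvQP, pvBP] at this
      exact this
    · rw [pvOpener, pvQP, pvBP, g2 j (by omega) hj]
      have e1' : (f == '"') = false := by
        rcases hfqc with rfl | rfl <;> decide
      have e2' : (f == '(') = false := by
        rcases hfqc with rfl | rfl <;> decide
      rw [e1', e2']
      simp
  -- scanning s directly
  have hsc1 : pvScan s true .mout =
      (P ++ List.replicate (b + 1 - a) f ++ (pvScan Suf true .mout).1,
       (pvScan Suf true .mout).2) := by
    have h0 : pvEv s 0 = true := rfl
    have := pvScan_prefix s a (by omega) 0 (by omega) (fun j _ hj => hpref j hj)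
    rw [List.drop_zero, h0, Nat.sub_zero] at this
    rw [this, hclose, List.append_assoc]
  -- scanning the replaced string
  have hsc2 : pvScan (pvReplacePart s (a : Int) (b : Int) f) true .mout =
      (P ++ List.replicate (b + 1 - a) f ++ (pvScan Suf true .mout).1,
       (pvScan Suf true .mout).2) := by
    have h0 : pvEv (pvReplacePart s (a : Int) (b : Int) f) 0 = true := rfl
    have hpre' := pvScan_prefix (pvReplacePart s (a : Int) (b : Int) f) (b + 1)
      (by omega) 0 (by omega) (fun j _ hj => hop' j hj)
    rw [List.drop_zero, h0, Nat.sub_zero] at hpre'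
    have htake : (pvReplacePart s (a : Int) (b : Int) f).take (b + 1) = P ++ F := by
      rw [e1, List.append_assoc]
      rw [← List.append_assoc, List.take_left' hPFlen]
    have hdrop : (pvReplacePart s (a : Int) (b : Int) f).drop (b + 1) = Suf := by
      rw [e1, List.append_assoc, ← List.append_assoc, List.drop_left' hPFlen]
    have hevb1 : pvEv (pvReplacePart s (a : Int) (b : Int) f) (b + 1) = true := by
      rw [pvEv_succ, g2 b (by omega) (by omega)]
      have : (f == '\\') = false := by rcases hfqc with rfl | rfl <;> decide
      rw [this]
      simp
    rw [hpre', htake, hdrop, hevb1, List.append_assoc]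
  refine ⟨hsc1, by rw [hsc2, hsc1], ?_⟩
  -- the count decreases
  have hsdec : s = P ++ (s.drop a).take (b + 1 - a) ++ Suf := by
    rw [List.append_assoc, hSuf]
    have h1 : (s.drop a).take (b + 1 - a) ++ s.drop (b + 1) = s.drop a := by
      have : s.drop (b + 1) = (s.drop a).drop (b + 1 - a) := by
        rw [List.drop_drop]
        congr 1
        omega
      rw [this, List.take_append_drop]
    rw [h1, List.take_append_drop]
  have hmem : s.getD a ' ' ∈ (s.drop a).take (b + 1 - a) := by
    have hd : s.drop a = s[a] :: s.drop (a + 1) := List.drop_eq_getElem_cons ha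
    have ht : (s.drop a).take (b + 1 - a) = s[a] :: (s.drop (a + 1)).take (b + 1 - a - 1) := by
      rw [hd]
      have : b + 1 - a = (b + 1 - a - 1) + 1 := by omega
      rw [this, List.take_succ_cons]
      congr 1
    rw [ht, pvGetD_at s a ha]
    exact List.mem_cons_self
  have hcq : (pvReplacePart s (a : Int) (b : Int) f).count '"' =
      P.count '"' + Suf.count '"' := by
    rw [e1, List.count_append, List.count_append, pvCount_replicate _ _ _ hfq]
    omega
  have hcb : (pvReplacePart s (a : Int) (b : Int) f).count '(' =
      P.count '(' + Suf.count '(' := by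
    rw [e1, List.count_append, List.count_append, pvCount_replicate _ _ _ hfb]
    omega
  have hsq : s.count '"' = P.count '"' + ((s.drop a).take (b + 1 - a)).count '"' + Suf.count '"' := by
    conv_lhs => rw [hsdec]
    rw [List.count_append, List.count_append]
  have hsb : s.count '(' = P.count '(' + ((s.drop a).take (b + 1 - a)).count '(' + Suf.count '(' := by
    conv_lhs => rw [hsdec]
    rw [List.count_append, List.count_append]
  rcases hopa with hq | hq
  · have : 1 ≤ ((s.drop a).take (b + 1 - a)).count '"' := by
      rw [← hq]
      exact List.count_pos_iff.mpr hmem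
    omega
  · have : 1 ≤ ((s.drop a).take (b + 1 - a)).count '(' := by
      rw [← hq]
      exact List.count_pos_iff.mpr hmem
    omega

theorem pvQuoteCase (s : List Char) (qa : Nat)
    (hq1 : pvFirst s (pvQP s) 0 = some qa)
    (hpref : ∀ j, j < qa → pvOpener s j = false)
    (hb : (pvScan s true .mout).2 = .mout) :
    ∃ b : Nat, pvCloseQuote s (qa : Int) = some ((b : Int)) ∧
      pvScan (pvReplacePart s (qa : Int) (b : Int) 'q') true .mout = pvScan s true .mout ∧
      (pvReplacePart s (qa : Int) (b : Int) 'q').count '"' +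
        (pvReplacePart s (qa : Int) (b : Int) 'q').count '(' <
        s.count '"' + s.count '(' := by
  obtain ⟨-, hqalen, hqaP, -⟩ := pvFirst_some s _ _ _ hq1
  have hEva : pvEv s qa = true := (Bool.and_eq_true _ _ |>.mp hqaP).1
  have hCha : s.getD qa ' ' = '"' := by
    have := (Bool.and_eq_true _ _ |>.mp hqaP).2; simpa using this
  have hch : s.getD qa ' ' ≠ '\\' := by rw [hCha]; decide
  have hcq := pvCloseQuote_eq s qa hqalen hch
  cases hq2 : pvFirst s (pvQP s) (qa + 1) with
  | none =>
    exfalso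
    have hpre := pvScan_prefix s qa (by omega) 0 (by omega) (fun j _ hj => hpref j hj)
    rw [List.drop_zero, Nat.sub_zero] at hpre
    have h0 : pvEv s 0 = true := rfl
    rw [h0] at hpre
    have hX : (pvScan (s.drop qa) (pvEv s qa) .mout).2 = PvMode.mq := by
      rw [List.drop_eq_getElem_cons hqalen]
      simp only [pvScan]
      have hcq' : (pvEv s qa && (s[qa] == '"')) = true := by
        rw [← pvGetD_at s qa hqalen, hEva, hCha]
        rfl
      rw [hcq']
      simp only [if_pos rfl]
      rw [pvEv_step s qa hqalen]
      exact pvScan_q_none s (qa + 1) hq2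
    rw [hpre] at hb
    simp only at hb
    rw [hX] at hb
    exact absurd hb (by decide)
  | some b =>
    obtain ⟨hab, hblen, hbP, -⟩ := pvFirst_some s _ _ _ hq2
    have hChb : s.getD b ' ' = '"' := by
      have := (Bool.and_eq_true _ _ |>.mp hbP).2; simpa using this
    have hEvb1 : pvEv s (b + 1) = true := by
      rw [pvEv_succ, hChb]
      simp
    have hclose_scan : pvScan (s.drop qa) (pvEv s qa) .mout =
        (List.replicate (b + 1 - qa) 'q' ++ (pvScan (s.drop (b + 1)) true .mout).1,
         (pvScan (s.drop (b + 1)) true .mout).2) := by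
      rw [List.drop_eq_getElem_cons hqalen]
      simp only [pvScan]
      have hcq' : (pvEv s qa && (s[qa] == '"')) = true := by
        rw [← pvGetD_at s qa hqalen, hEva, hCha]
        rfl
      rw [hcq']
      simp only [if_pos rfl]
      rw [pvEv_step s qa hqalen, pvScan_q_some s b (qa + 1) hq2, hEvb1]
      have hsub : b + 1 - qa = (b + 1 - (qa + 1)) + 1 := by omega
      rw [hsub, List.replicate_succ]
      rfl
    obtain ⟨-, h2, h3⟩ := pvStep_main s qa b 'q' (Or.inl rfl) hqalen hab hblen hpref
      (Or.inl hCha) hclose_scan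
    refine ⟨b, ?_, h2, h3⟩
    rw [hcq, hq2]

theorem pvBracketCase (s : List Char) (ba : Nat)
    (hb1 : pvFirst s (pvBP s) 0 = some ba)
    (hpref : ∀ j, j < ba → pvOpener s j = false)
    (hb : (pvScan s true .mout).2 = .mout) :
    ∃ b : Nat, pvCloseBracket s (ba : Int) = some ((b : Int)) ∧
      pvScan (pvReplacePart s (ba : Int) (b : Int) 'c') true .mout = pvScan s true .mout ∧
      (pvReplacePart s (ba : Int) (b : Int) 'c').count '"' +
        (pvReplacePart s (ba : Int) (b : Int) 'c').count '(' <
        s.count '"' + s.count '(' := by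
  obtain ⟨-, hbalen, hbaP, -⟩ := pvFirst_some s _ _ _ hb1
  have hEva : pvEv s ba = true := (Bool.and_eq_true _ _ |>.mp hbaP).1
  have hCha : s.getD ba ' ' = '(' := by
    have := (Bool.and_eq_true _ _ |>.mp hbaP).2; simpa using this
  have hch : s.getD ba ' ' ≠ '\\' := by rw [hCha]; decide
  have hcb := pvCloseBracket_eq s ba hbalen hch
  have hq'f : (pvEv s ba && (s[ba] == '"')) = false := by
    rw [← pvGetD_at s ba hbalen, hEva, hCha]
    rfl
  have hb't : (pvEv s ba && (s[ba] == '(')) = true := by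
    rw [← pvGetD_at s ba hbalen, hEva, hCha]
    rfl
  cases hq2 : pvCEx s (ba + 1) 1 with
  | none =>
    exfalso
    have hpre := pvScan_prefix s ba (by omega) 0 (by omega) (fun j _ hj => hpref j hj)
    rw [List.drop_zero, Nat.sub_zero] at hpre
    have h0 : pvEv s 0 = true := rfl
    rw [h0] at hpre
    have hX : (pvScan (s.drop ba) (pvEv s ba) .mout).2 ≠ PvMode.mout := by
      rw [List.drop_eq_getElem_cons hbalen]
      simp only [pvScan]
      rw [hq'f]
      simp only [Bool.false_eq_true, if_false]
      rw [hb't]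
      simp only [if_pos rfl]
      rw [pvEv_step s ba hbalen]
      exact pvScan_c_none s (s.length - (ba + 1)) (ba + 1) 1 (le_refl _) (by omega) hq2
    rw [hpre] at hb
    simp only at hb
    exact hX hb
  | some b =>
    obtain ⟨hab, hblen, _, hChb⟩ := pvCEx_spec s (s.length - (ba + 1)) (ba + 1) 1 b (le_refl _) hq2
    have hEvb1 : pvEv s (b + 1) = true := by
      rw [pvEv_succ, hChb]
      simp
    have hclose_scan : pvScan (s.drop ba) (pvEv s ba) .mout =
        (List.replicate (b + 1 - ba) 'c' ++ (pvScan (s.drop (b + 1)) true .mout).1,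
         (pvScan (s.drop (b + 1)) true .mout).2) := by
      rw [List.drop_eq_getElem_cons hbalen]
      simp only [pvScan]
      rw [hq'f]
      simp only [Bool.false_eq_true, if_false]
      rw [hb't]
      simp only [if_pos rfl]
      rw [pvEv_step s ba hbalen,
        pvScan_c_some s b (s.length - (ba + 1)) (ba + 1) 1 (le_refl _) (by omega) hq2, hEvb1]
      have hsub : b + 1 - ba = (b + 1 - (ba + 1)) + 1 := by omega
      rw [hsub, List.replicate_succ]
      rfl
    obtain ⟨-, h2, h3⟩ := pvStep_main s ba b 'c' (Or.inr rfl) hbalen hab hblen hpref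
      (Or.inr hCha) hclose_scan
    refine ⟨b, ?_, h2, h3⟩
    rw [hcb, hq2]

theorem pvRQC_eq : ∀ (n : Nat) (s : List Char), s.count '"' + s.count '(' < n →
    (pvScan s true .mout).2 = .mout → pvRQC n s = (pvScan s true .mout).1 := by
  intro n
  induction n with
  | zero => intro s hn hb; omega
  | succ n ih =>
    intro s hn hb
    conv_lhs => rw [pvRQC]
    rw [pvOQB_eq s]
    cases hq1 : pvFirst s (pvQP s) 0 with
    | none =>
      cases hb1 : pvFirst s (pvBP s) 0 with
      | none =>
        have hpref : ∀ j, j < s.length → pvOpener s j = false := by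
          intro j hj
          rw [pvOpener, pvFirst_none s _ 0 hq1 j (by omega) hj,
            pvFirst_none s _ 0 hb1 j (by omega) hj]
          rfl
        have hpre := pvScan_prefix s s.length (le_refl _) 0 (by omega)
          (fun j _ hj => hpref j hj)
        rw [List.drop_zero, Nat.sub_zero] at hpre
        have h0 : pvEv s 0 = true := rfl
        rw [h0] at hpre
        rw [hpre]
        simp [List.drop_length, pvScan]
      | some ba =>
        have hprefB : ∀ j, j < ba → pvOpener s j = false := by
          intro j hj
          obtain ⟨-, hbalen, -, hminb⟩ := pvFirst_some s _ _ _ hb1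
          rw [pvOpener, pvFirst_none s _ 0 hq1 j (by omega) (by omega),
            hminb j (by omega) hj]
          rfl
        obtain ⟨b, hclose, hmask, hcount⟩ := pvBracketCase s ba hb1 hprefB hb
        have hb' : (pvScan (pvReplacePart s (ba : Int) (b : Int) 'c') true .mout).2 =
            PvMode.mout := by rw [hmask]; exact hb
        have hba1 : ((ba : Int) != -1) = true := by simp
        simp only [hba1]
        rw [if_pos (by rfl)]
        rw [hclose]
        show pvRQC n (pvReplacePart s (ba : Int) (b : Int) 'c') = (pvScan s true PvMode.mout).1
        rw [ih (pvReplacePart s (ba : Int) (b : Int) 'c') (by omega) hb', hmask]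
    | some qa =>
      have hqa1 : ((qa : Int) == -1) = false := by simp
      cases hb1 : pvFirst s (pvBP s) 0 with
      | none =>
        have hprefQ : ∀ j, j < qa → pvOpener s j = false := by
          intro j hj
          obtain ⟨-, hqalen, -, hminq⟩ := pvFirst_some s _ _ _ hq1
          rw [pvOpener, hminq j (by omega) hj,
            pvFirst_none s _ 0 hb1 j (by omega) (by omega)]
          rfl
        obtain ⟨b, hclose, hmask, hcount⟩ := pvQuoteCase s qa hq1 hprefQ hb
        have hb' : (pvScan (pvReplacePart s (qa : Int) (b : Int) 'q') true .mout).2 =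
            PvMode.mout := by rw [hmask]; exact hb
        simp only [hqa1, Bool.false_and, Bool.false_eq_true, if_false]
        rw [if_pos (by simp [hqa1])]
        rw [hclose]
        show pvRQC n (pvReplacePart s (qa : Int) (b : Int) 'q') = (pvScan s true PvMode.mout).1
        rw [ih (pvReplacePart s (qa : Int) (b : Int) 'q') (by omega) hb', hmask]
      | some ba =>
        have hba1 : ((ba : Int) == -1) = false := by simp
        obtain ⟨-, hqalen, hqaP, hminq⟩ := pvFirst_some s _ _ _ hq1
        obtain ⟨-, hbalen, hbaP, hminb⟩ := pvFirst_some s _ _ _ hb1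
        have hne : qa ≠ ba := by
          intro he
          have h1 : s.getD qa ' ' = '"' := by
            have := (Bool.and_eq_true _ _ |>.mp hqaP).2; simpa using this
          have h2 : s.getD ba ' ' = '(' := by
            have := (Bool.and_eq_true _ _ |>.mp hbaP).2; simpa using this
          rw [he, h2] at h1
          exact absurd h1 (by decide)
        simp only [hqa1, hba1, Bool.false_and, Bool.and_false, Bool.false_eq_true, if_false]
        by_cases hlt : qa < ba
        · rw [if_pos (by exact_mod_cast hlt)]
          have hprefQ : ∀ j, j < qa → pvOpener s j = false := by
            intro j hj
            rw [pvOpener, hminq j (by omega) hj, hminb j (by omega) (by omega)]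
            rfl
          obtain ⟨b, hclose, hmask, hcount⟩ := pvQuoteCase s qa hq1 hprefQ hb
          have hb' : (pvScan (pvReplacePart s (qa : Int) (b : Int) 'q') true .mout).2 =
              PvMode.mout := by rw [hmask]; exact hb
          rw [hclose]
          show pvRQC n (pvReplacePart s (qa : Int) (b : Int) 'q') = (pvScan s true PvMode.mout).1
          rw [ih (pvReplacePart s (qa : Int) (b : Int) 'q') (by omega) hb', hmask]
        · have hgt : ba < qa := by omega
          rw [if_neg (by exact_mod_cast hlt)]
          have hprefB : ∀ j, j < ba → pvOpener s j = false := by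
            intro j hj
            rw [pvOpener, hminq j (by omega) (by omega), hminb j (by omega) hj]
            rfl
          obtain ⟨b, hclose, hmask, hcount⟩ := pvBracketCase s ba hb1 hprefB hb
          have hb' : (pvScan (pvReplacePart s (ba : Int) (b : Int) 'c') true .mout).2 =
              PvMode.mout := by rw [hmask]; exact hb
          rw [hclose]
          show pvRQC n (pvReplacePart s (ba : Int) (b : Int) 'c') = (pvScan s true PvMode.mout).1
          rw [ih (pvReplacePart s (ba : Int) (b : Int) 'c') (by omega) hb', hmask]

theorem pvFC_ge (l : List Char) (c : Char) : -1 ≤ pvFC l c := by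
  induction l with
  | nil => simp [pvFC]
  | cons y ys ihy => rw [pvFC]; split; omega; split; omega; omega

theorem pvFC_cons_ne (x : Char) (xs : List Char) (h : (x == '@') = false) :
    pvFC (x :: xs) '@' = if pvFC xs '@' == -1 then -1 else pvFC xs '@' + 1 := by
  rw [pvFC, h]
  simp

theorem pvShift (j : Nat) (r : Int) (hr : -1 ≤ r) :
    (if r == -1 then (-1 : Int) else ((j + 1 : Nat) : Int) + r) =
    (if (if r == -1 then (-1 : Int) else r + 1) == -1 then -1
     else (j : Int) + (if r == -1 then (-1 : Int) else r + 1)) := by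
  by_cases hr1 : r = -1
  · simp [hr1]
  · have h1 : (r == -1) = false := by simp [hr1]
    rw [h1]
    simp only [Bool.false_eq_true, if_false]
    have h2 : (r + 1 == -1) = false := by simp; omega
    rw [h2]
    simp only [Bool.false_eq_true, if_false]
    push_cast
    ring

theorem pvAt_eq (s : List Char) : ∀ (n j : Nat) (st : PvMode), s.length - j ≤ n →
    pvAt (s.drop j) j (pvEv s j) st =
      (if pvFC (pvScan (s.drop j) (pvEv s j) st).1 '@' == -1 then -1
       else (j : Int) + pvFC (pvScan (s.drop j) (pvEv s j) st).1 '@') := by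
  intro n
  induction n with
  | zero =>
    intro j st hn
    rw [List.drop_eq_nil_of_le (by omega)]
    simp [pvAt, pvScan, pvFC]
  | succ n ih =>
    intro j st hn
    by_cases hj : j < s.length
    · rw [List.drop_eq_getElem_cons hj]
      simp only [pvAt, pvScan]
      rw [pvEv_step s j hj]
      have IH := fun st => ih (j + 1) st (by omega)
      cases st with
      | mout =>
        by_cases h1 : (pvEv s j && (s[j] == '"')) = true
        · rw [h1]
          simp only [if_true]
          rw [IH .mq, pvFC_cons_ne 'q' _ (by decide)]
          exact pvShift j _ (pvFC_ge _ _)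
        · rw [Bool.eq_false_iff.mpr h1]
          simp only [Bool.false_eq_true, if_false]
          by_cases h2 : (pvEv s j && (s[j] == '(')) = true
          · rw [h2]
            simp only [if_true]
            rw [IH (.mc 1), pvFC_cons_ne 'c' _ (by decide)]
            exact pvShift j _ (pvFC_ge _ _)
          · rw [Bool.eq_false_iff.mpr h2]
            simp only [Bool.false_eq_true, if_false]
            by_cases h3 : (s[j] == '@') = true
            · rw [h3]
              simp only [if_true]
              rw [pvFC]
              rw [h3]
              simp
            · rw [Bool.eq_false_iff.mpr h3]
              simp only [Bool.false_eq_true, if_false]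
              rw [IH .mout, pvFC_cons_ne s[j] _ (Bool.eq_false_iff.mpr h3)]
              exact pvShift j _ (pvFC_ge _ _)
      | mq =>
        by_cases h1 : (pvEv s j && (s[j] == '"')) = true
        · rw [h1]
          simp only [if_true]
          rw [IH .mout, pvFC_cons_ne 'q' _ (by decide)]
          exact pvShift j _ (pvFC_ge _ _)
        · rw [Bool.eq_false_iff.mpr h1]
          simp only [Bool.false_eq_true, if_false]
          rw [IH .mq, pvFC_cons_ne 'q' _ (by decide)]
          exact pvShift j _ (pvFC_ge _ _)
      | mc d =>
        by_cases h1 : (pvEv s j && (s[j] == '(')) = true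
        · rw [h1]
          simp only [if_true]
          rw [IH (.mc (d + 1)), pvFC_cons_ne 'c' _ (by decide)]
          exact pvShift j _ (pvFC_ge _ _)
        · rw [Bool.eq_false_iff.mpr h1]
          simp only [Bool.false_eq_true, if_false]
          by_cases h2 : (pvEv s j && (s[j] == ')')) = true
          · rw [h2]
            simp only [if_true]
            by_cases hd1 : (d == 1) = true
            · rw [hd1]
              simp only [if_true]
              rw [IH .mout, pvFC_cons_ne 'c' _ (by decide)]
              exact pvShift j _ (pvFC_ge _ _)
            · rw [Bool.eq_false_iff.mpr hd1]
              simp only [Bool.false_eq_true, if_false]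
              rw [IH (.mc (d - 1)), pvFC_cons_ne 'c' _ (by decide)]
              exact pvShift j _ (pvFC_ge _ _)
          · rw [Bool.eq_false_iff.mpr h2]
            simp only [Bool.false_eq_true, if_false]
            rw [IH (.mc d), pvFC_cons_ne 'c' _ (by decide)]
            exact pvShift j _ (pvFC_ge _ _)
    · rw [List.drop_eq_nil_of_le (by omega)]
      simp [pvAt, pvScan, pvFC]


-- ===== VERDICT (by name: the statement is the Claim_ definition above) =====
theorem FindTLD_spec : Claim_equal_FindTLD := by
  intro address _hd hpre
  unfold Pre_FindTLD at hpre
  unfold Spec_FindTLD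
  have hAeq : FindTLD address = String.ofList (PySem.List.slice address.toList
      (some ((((List.range address.toList.length).foldl
        (fun ld ch => if address.toList.getD ch ' ' == '.' then (ch : Int) else ld)
        (PySem.Chars.find (pvRQC (address.toList.length + 1) address.toList) ['@']))) + 1))
      none) := rfl
  have hBeq : FindTLD_alt address = String.ofList (PySem.List.slice address.toList
      (some ((if pvDotLoop address.toList 0 (-1) == -1
              then pvAt address.toList 0 true PvMode.mout
              else pvDotLoop address.toList 0 (-1)) + 1))
      none) := rfl
  rw [hAeq, hBeq]
  set s := address.toList with hs
  have hfuel : s.count '"' + s.count '(' < s.length + 1 := by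
    have := pvTwoCount s
    omega
  have hmask := pvRQC_eq (s.length + 1) s hfuel hpre
  have hfind : PySem.Chars.find (pvRQC (s.length + 1) s) ['@'] =
      pvFC ((pvScan s true .mout)).1 '@' := by
    rw [hmask, pvFind_single]
  have hat : pvAt s 0 true PvMode.mout = pvFC ((pvScan s true .mout)).1 '@' := by
    have h := pvAt_eq s s.length 0 PvMode.mout (by omega)
    rw [List.drop_zero] at h
    have h0 : pvEv s 0 = true := rfl
    rw [h0] at h
    rw [h]
    by_cases hfc : pvFC ((pvScan s true PvMode.mout)).1 '@' = -1
    · rw [hfc]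
      rfl
    · rw [if_neg (by simpa using hfc)]
      push_cast
      ring
  have hA := pvDot_A s 0 (PySem.Chars.find (pvRQC (s.length + 1) s) ['@'])
  rw [Nat.sub_zero] at hA
  have hB := pvDot_B s 0 (-1)
  rw [List.drop_zero] at hB
  rw [List.range_eq_range', hA, hB]
  cases hlf : pvLastFrom s 0 with
  | some j =>
    simp only
    rw [if_neg (by simp)]
  | none =>
    simp only
    rw [if_pos (by rfl), hfind, hat]
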